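-- pv_equiv track=rewrite | github.com/CSE5914PaperLink/CSE5914 | backend/app/services/comparison_service.py | _aggregate_section_text
-- ===== SOURCE A (Python) =====
-- from typing import Any, Dict, List, Optional, Tuple
--
-- MAX_SECTION_CHARACTERS = 3000
--
-- def _aggregate_section_text(chunks: List[Dict[str, Any]]) -> str:
--     if not chunks:
--         return ""
--     texts = []
--     total_chars = 0
--     for chunk in chunks:
--         text = (chunk.get("text") or "").strip()
--         if not text:
--             continue
--         texts.append(text)
--         total_chars += len(text)
--         if total_chars >= MAX_SECTION_CHARACTERS:
--             break
--     return "\n\n".join(texts)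
-- ===== SOURCE B (Python) =====
-- from itertools import accumulate
--
-- MAX_SECTION_CHARACTERS = 3000
--
-- def _aggregate_section_text(chunks):
--     texts = [t for t in ((c.get("text") or "").strip() for c in chunks) if t]
--     cums = list(accumulate(len(t) for t in texts))
--     first = next((i for i, s in enumerate(cums) if s >= MAX_SECTION_CHARACTERS), None)
--     cutoff = len(texts) if first is None else first + 1
--     return "\n\n".join(texts[:cutoff])
-- ===== Notes on version B (the rewrite author's own statement) =====
-- stated objective: alternative
-- what changed: Replaces A's single stateful accumulate-and-break loop with a pipeline: build the full list of stripped non-empty texts, take cumulative length prefix sums, find the first index reaching the budget, and join a take-prefix of the list.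
import Mathlib
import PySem

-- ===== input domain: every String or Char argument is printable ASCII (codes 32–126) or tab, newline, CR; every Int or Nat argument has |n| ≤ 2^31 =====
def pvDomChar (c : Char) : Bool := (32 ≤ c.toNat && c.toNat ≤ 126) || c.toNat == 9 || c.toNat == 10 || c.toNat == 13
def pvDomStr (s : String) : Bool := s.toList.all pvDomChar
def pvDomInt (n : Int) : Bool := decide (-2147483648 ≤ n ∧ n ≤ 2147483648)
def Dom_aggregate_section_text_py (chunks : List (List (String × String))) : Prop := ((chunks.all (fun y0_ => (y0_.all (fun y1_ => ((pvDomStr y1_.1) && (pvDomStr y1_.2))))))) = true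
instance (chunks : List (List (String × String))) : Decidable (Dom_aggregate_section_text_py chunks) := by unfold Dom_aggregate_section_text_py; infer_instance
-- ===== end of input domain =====

-- B replaces A's stateful accumulate-and-break loop by a pipeline (full text list, prefix sums,
-- first index reaching the budget, take+join); same cost, different decomposition ('alternative').

-- ===== PORT A =====
-- the stripped "text" value of one chunk dict ('(chunk.get("text") or "").strip()')
def pvChunkText (c : List (String × String)) : String :=
  PySem.Str.strip (((PySem.Dict.mk c).get? "text").getD "")

-- A's for-loop with break: state = (texts, total_chars)
def pvAggLoopA : List (List (String × String)) → List String → Int → List String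
  | [], texts, _ => texts
  | c :: rest, texts, total =>
    let text := pvChunkText c
    if text = "" then pvAggLoopA rest texts total
    else
      let texts2 := texts ++ [text]
      let total2 := total + PySem.Str.len text
      if 3000 ≤ total2 then texts2 else pvAggLoopA rest texts2 total2

def aggregate_section_text_py (chunks : List (List (String × String))) : String :=
  if chunks = [] then "" else PySem.Str.join "\n\n" (pvAggLoopA chunks [] 0)

-- ===== PORT B =====
-- texts = [t for t in ((c.get("text") or "").strip() for c in chunks) if t]
def pvTextsB (chunks : List (List (String × String))) : List String :=
  (chunks.map pvChunkText).filter (fun t => t ≠ "")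

-- cums = list(accumulate(len(t) for t in texts))
def pvCumsB : Int → List Int → List Int
  | _, [] => []
  | acc, n :: rest => (acc + n) :: pvCumsB (acc + n) rest

-- first = next((i for i, s in enumerate(cums) if s >= MAX), None)
def pvFirstGE : List Int → Nat → Option Nat
  | [], _ => none
  | s :: rest, i => if 3000 ≤ s then some i else pvFirstGE rest (i + 1)

def aggregate_section_text_py_alt (chunks : List (List (String × String))) : String :=
  PySem.Str.join "\n\n"
    ((pvTextsB chunks).take
      (match pvFirstGE (pvCumsB 0 ((pvTextsB chunks).map PySem.Str.len)) 0 with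
        | none => (pvTextsB chunks).length
        | some i => i + 1))

-- ===== PRECONDITION & SPEC =====
def Spec_aggregate_section_text_py (chunks : List (List (String × String))) (out : String) : Prop := out = aggregate_section_text_py_alt chunks
instance (chunks : List (List (String × String))) (out : String) : Decidable (Spec_aggregate_section_text_py chunks out) := by unfold Spec_aggregate_section_text_py; infer_instance

-- ===== CLAIM (what is proved, stated in full; the proofs are below) =====
def Claim_equal_aggregate_section_text_py : Prop := ∀ (chunks : List (List (String × String))), Dom_aggregate_section_text_py chunks → Spec_aggregate_section_text_py chunks (aggregate_section_text_py chunks)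

-- ===== LEMMAS AND PROOFS =====

-- common characterisation: greedily take texts while the running total stays under 3000,
-- including the first text that reaches it
def pvTakeBudget : Int → List String → List String
  | _, [] => []
  | r, t :: ts =>
    if r ≤ PySem.Str.len t then [t] else t :: pvTakeBudget (r - PySem.Str.len t) ts

theorem pvAggLoopA_cons (c : List (String × String)) (rest : List (List (String × String)))
    (texts : List String) (total : Int) :
    pvAggLoopA (c :: rest) texts total =
      if pvChunkText c = "" then pvAggLoopA rest texts total
      else if 3000 ≤ total + PySem.Str.len (pvChunkText c) then texts ++ [pvChunkText c]
      else pvAggLoopA rest (texts ++ [pvChunkText c]) (total + PySem.Str.len (pvChunkText c)) := rfl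

theorem pvTakeBudget_cons (r : Int) (t : String) (ts : List String) :
    pvTakeBudget r (t :: ts) =
      if r ≤ PySem.Str.len t then [t] else t :: pvTakeBudget (r - PySem.Str.len t) ts := rfl

theorem pvTextsB_cons (c : List (String × String)) (rest : List (List (String × String))) :
    pvTextsB (c :: rest) =
      if pvChunkText c = "" then pvTextsB rest else pvChunkText c :: pvTextsB rest := by
  simp only [pvTextsB, List.map_cons, List.filter_cons]
  by_cases h : pvChunkText c = "" <;> simp [h]

theorem pvAggLoopA_eq (l : List (List (String × String))) :
    ∀ (texts : List String) (total : Int),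
      pvAggLoopA l texts total = texts ++ pvTakeBudget (3000 - total) (pvTextsB l) := by
  induction l with
  | nil => intro texts total; simp [pvAggLoopA, pvTextsB, pvTakeBudget]
  | cons c rest ih =>
    intro texts total
    rw [pvAggLoopA_cons, pvTextsB_cons]
    by_cases h : pvChunkText c = ""
    · rw [if_pos h, if_pos h, ih]
    · rw [if_neg h, if_neg h, pvTakeBudget_cons]
      by_cases hb : (3000 : Int) ≤ total + PySem.Str.len (pvChunkText c)
      · rw [if_pos hb, if_pos (by omega)]
      · rw [if_neg hb, if_neg (by omega : ¬ (3000 : Int) - total ≤ PySem.Str.len (pvChunkText c))]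
        rw [ih]
        have harith : (3000 : Int) - (total + PySem.Str.len (pvChunkText c)) =
            3000 - total - PySem.Str.len (pvChunkText c) := by ring
        rw [harith, List.append_assoc, List.singleton_append]

theorem pvFirstGE_shift (l : List Int) : ∀ i : Nat, pvFirstGE l i = (pvFirstGE l 0).map (· + i) := by
  induction l with
  | nil => intro i; simp [pvFirstGE]
  | cons s rest ih =>
    intro i
    by_cases h : (3000 : Int) ≤ s
    · simp [pvFirstGE, h]
    · simp only [pvFirstGE, if_neg h]
      rw [ih (i + 1), ih 1]
      cases pvFirstGE rest 0 <;> simp <;> omega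

theorem pvTakeB_eq (ts : List String) :
    ∀ acc : Int,
      ts.take (match pvFirstGE (pvCumsB acc (ts.map PySem.Str.len)) 0 with
        | none => ts.length
        | some i => i + 1) = pvTakeBudget (3000 - acc) ts := by
  induction ts with
  | nil => intro acc; simp [pvCumsB, pvFirstGE, pvTakeBudget]
  | cons t ts ih =>
    intro acc
    simp only [List.map, pvCumsB, pvFirstGE]
    by_cases h : (3000 : Int) ≤ acc + PySem.Str.len t
    · rw [if_pos h]
      rw [pvTakeBudget_cons, if_pos (by omega)]
      simp
    · rw [if_neg h]
      rw [pvFirstGE_shift _ 1]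
      have ihh := ih (acc + PySem.Str.len t)
      have harith : (3000 : Int) - (acc + PySem.Str.len t) = 3000 - acc - PySem.Str.len t := by ring
      rw [harith] at ihh
      rw [pvTakeBudget_cons, if_neg (by omega : ¬ (3000 : Int) - acc ≤ PySem.Str.len t)]
      cases hfind : pvFirstGE (pvCumsB (acc + PySem.Str.len t) (ts.map PySem.Str.len)) 0 with
      | none =>
        rw [hfind] at ihh
        simpa using ihh
      | some k =>
        rw [hfind] at ihh
        simpa using ihh

-- ===== VERDICT (by name: the statement is the Claim_ definition above) =====
theorem aggregate_section_text_py_spec : Claim_equal_aggregate_section_text_py := by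
  intro chunks _
  unfold Spec_aggregate_section_text_py aggregate_section_text_py aggregate_section_text_py_alt
  by_cases h : chunks = []
  · subst h; decide
  · rw [if_neg h, pvAggLoopA_eq, List.nil_append, ← pvTakeB_eq (pvTextsB chunks) 0]
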